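-- pv_equiv track=rewrite | github.com/krtxt/ShadowObj2Points | src/datamodules/utils/transform_utils.py | generate_negative_prompts
-- ===== SOURCE A (Python) =====
-- def generate_negative_prompts(
--     scene_collision_info: list, current_obj_name: str, num_neg_prompts: int = 4
-- ) -> list:
--     """
--     Generate negative prompts from other objects in the scene.
--
--     Args:
--         scene_collision_info: List of collision-free grasp info for the scene
--         current_obj_name: Name of the current target object
--         num_neg_prompts: Number of negative prompts to generate
--
--     Returns:
--         List of negative prompt strings
--     """
--     # Collect all other object names in the scene
--     other_object_names = []
--
--     for obj_info in scene_collision_info: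
--         obj_name = obj_info.get("object_name")
--         if obj_name and obj_name != current_obj_name:
--             other_object_names.append(obj_name)
--
--     # Remove duplicates while preserving order
--     unique_object_names = []
--     seen_names = set()
--     for name in other_object_names:
--         if name not in seen_names:
--             unique_object_names.append(name)
--             seen_names.add(name)
--
--     # Generate negative prompts list according to required count
--     if len(unique_object_names) == 0:
--         # No other objects in scene - use empty strings
--         negative_prompts = [""] * num_neg_prompts
--     elif len(unique_object_names) < num_neg_prompts:
--         # Fewer objects than required - pad with last object name
--         negative_prompts = unique_object_names + [unique_object_names[-1]] * (
--             num_neg_prompts - len(unique_object_names)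
--         )
--     else:
--         # More objects than required - take first N objects
--         negative_prompts = unique_object_names[:num_neg_prompts]
--
--     return negative_prompts
-- ===== SOURCE B (Python) =====
-- def generate_negative_prompts(
--     scene_collision_info: list, current_obj_name: str, num_neg_prompts: int = 4
-- ) -> list:
--     """Streaming quota-driven pass: emit each new other-object name directly into the
--     result and stop as soon as the quota is met (early exit); whatever quota remains
--     at the end of the scene is padded with the last emitted name."""
--     prompts = []
--     seen = set()
--     last = ""
--     remaining = num_neg_prompts
--     for obj_info in scene_collision_info:
--         if remaining <= 0:
--             return prompts
--         name = obj_info.get("object_name")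
--         if name and name != current_obj_name and name not in seen:
--             seen.add(name)
--             prompts.append(name)
--             last = name
--             remaining -= 1
--     return prompts + [last] * remaining
-- ===== Notes on version B (the rewrite author's own statement) =====
-- stated objective: alternative
-- what changed: B replaces A's three stages (collect all other names, dedup into a full unique list, then a three-branch pad/slice) by one streaming quota-driven loop that emits prompts directly, exits early once num_neg_prompts are found, and pads the leftover quota with the last emitted name.
-- intended difference: For negative num_neg_prompts with more than -num_neg_prompts distinct other names, A returns the unique list with its last -num_neg_prompts entries sliced off (an artefact of Python negative slicing applied to a count), while B returns [], the intended result for a non-positive requested count. — e.g. on generate_negative_prompts([[("object_name", "a")], [("object_name", "b")]], "c", -1): A returns ["a"], B returns []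
import Mathlib
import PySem

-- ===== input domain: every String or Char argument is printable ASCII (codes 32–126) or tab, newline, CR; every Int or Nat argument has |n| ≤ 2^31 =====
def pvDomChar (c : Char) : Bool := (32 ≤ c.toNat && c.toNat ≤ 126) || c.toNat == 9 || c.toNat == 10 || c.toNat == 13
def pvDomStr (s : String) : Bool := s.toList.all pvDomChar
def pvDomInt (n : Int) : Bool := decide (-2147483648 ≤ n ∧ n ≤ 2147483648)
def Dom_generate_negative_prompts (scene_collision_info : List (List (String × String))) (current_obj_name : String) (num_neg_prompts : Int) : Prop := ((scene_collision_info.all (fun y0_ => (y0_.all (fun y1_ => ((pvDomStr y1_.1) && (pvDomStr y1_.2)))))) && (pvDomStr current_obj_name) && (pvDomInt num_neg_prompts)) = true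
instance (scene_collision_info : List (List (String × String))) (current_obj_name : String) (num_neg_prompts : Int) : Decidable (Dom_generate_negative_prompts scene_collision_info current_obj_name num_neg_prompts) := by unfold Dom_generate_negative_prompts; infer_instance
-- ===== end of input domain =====

-- B replaces A's collect / dedup / three-branch pad-slice stages by one streaming
-- quota-driven loop that emits prompts directly and exits early (objective: alternative).

-- ===== PORT A =====
def generate_negative_prompts (scene_collision_info : List (List (String × String))) (current_obj_name : String) (num_neg_prompts : Int) : List String :=
  -- for obj_info in scene_collision_info: collect truthy names ≠ current_obj_name
  let other_object_names : List String := scene_collision_info.foldl (fun acc obj_info =>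
    match (PySem.Dict.mk obj_info).get? "object_name" with
    | none => acc
    | some obj_name => if obj_name != "" && obj_name != current_obj_name then acc ++ [obj_name] else acc) []
  -- remove duplicates while preserving order (seen_names is a Python set)
  let p : List String × PySem.Set String := other_object_names.foldl (fun st name =>
    if st.2.contains name then st else (st.1 ++ [name], st.2.add name)) ([], PySem.Set.empty)
  let unique_object_names := p.1
  if unique_object_names.length = 0 then
    PySem.List.pyRepeat [""] num_neg_prompts
  else if (unique_object_names.length : Int) < num_neg_prompts then
    -- unique_object_names[-1] ported as pyGetD · (-1) (in this branch the list is nonempty)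
    unique_object_names ++ PySem.List.pyRepeat [PySem.List.pyGetD unique_object_names (-1) ""] (num_neg_prompts - unique_object_names.length)
  else
    PySem.List.slice unique_object_names none (some num_neg_prompts)

-- ===== PORT B =====
-- the for-loop of Source B with its early 'return prompts', as structural recursion over the scene;
-- state = (remaining quota, prompts so far, seen set, last emitted name)
def pvAltGo (current_obj_name : String) (items : List (List (String × String))) (remaining : Int) (prompts : List String) (seen : PySem.Set String) (last : String) : List String :=
  match items with
  | [] => prompts ++ PySem.List.pyRepeat [last] remaining
  | obj_info :: rest =>
      if remaining ≤ 0 then prompts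
      else match (PySem.Dict.mk obj_info).get? "object_name" with
        | none => pvAltGo current_obj_name rest remaining prompts seen last
        | some name =>
            if name != "" && name != current_obj_name && !PySem.Set.contains seen name then
              pvAltGo current_obj_name rest (remaining - 1) (prompts ++ [name]) (PySem.Set.add seen name) name
            else pvAltGo current_obj_name rest remaining prompts seen last

def generate_negative_prompts_alt (scene_collision_info : List (List (String × String))) (current_obj_name : String) (num_neg_prompts : Int) : List String :=
  pvAltGo current_obj_name scene_collision_info num_neg_prompts [] PySem.Set.empty ""

-- ===== PRECONDITION & SPEC =====
-- the valid other-object names of the scene, in order (used only to state D_)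
def pvFiltered (current_obj_name : String) (scene_collision_info : List (List (String × String))) : List String :=
  scene_collision_info.filterMap (fun obj_info =>
    match (PySem.Dict.mk obj_info).get? "object_name" with
    | none => none
    | some name => if name ≠ "" ∧ name ≠ current_obj_name then some name else none)

-- For negative num_neg_prompts with more than -num_neg_prompts distinct other names, A returns the
-- unique list with its last -num_neg_prompts entries sliced off (an artefact of Python negative
-- slicing applied to a count), while B returns [], the intended result for a non-positive count.
def D_generate_negative_prompts (scene_collision_info : List (List (String × String))) (current_obj_name : String) (num_neg_prompts : Int) : Prop :=
  num_neg_prompts < 0 ∧ ((PySem.List.dedup (pvFiltered current_obj_name scene_collision_info)).length : Int) + num_neg_prompts > 0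
instance (scene_collision_info : List (List (String × String))) (current_obj_name : String) (num_neg_prompts : Int) : Decidable (D_generate_negative_prompts scene_collision_info current_obj_name num_neg_prompts) := by unfold D_generate_negative_prompts; infer_instance

def Spec_generate_negative_prompts (scene_collision_info : List (List (String × String))) (current_obj_name : String) (num_neg_prompts : Int) (out : List String) : Prop := ¬ D_generate_negative_prompts scene_collision_info current_obj_name num_neg_prompts → out = generate_negative_prompts_alt scene_collision_info current_obj_name num_neg_prompts
instance (scene_collision_info : List (List (String × String))) (current_obj_name : String) (num_neg_prompts : Int) (out : List String) : Decidable (Spec_generate_negative_prompts scene_collision_info current_obj_name num_neg_prompts out) := by unfold Spec_generate_negative_prompts; infer_instance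

def pvDiffWitness_generate_negative_prompts : (List (List (String × String))) × String × Int := ([[("object_name", "a")], [("object_name", "b")]], "c", -1)
def pvDiffWitnessOut_generate_negative_prompts : (List String) × (List String) := (["a"], [])

-- ===== CLAIM =====
def Claim_unchanged_generate_negative_prompts : Prop := ∀ (scene_collision_info : List (List (String × String))) (current_obj_name : String) (num_neg_prompts : Int), Dom_generate_negative_prompts scene_collision_info current_obj_name num_neg_prompts → Spec_generate_negative_prompts scene_collision_info current_obj_name num_neg_prompts (generate_negative_prompts scene_collision_info current_obj_name num_neg_prompts)
def Claim_changed_generate_negative_prompts : Prop := Dom_generate_negative_prompts (pvDiffWitness_generate_negative_prompts.1) (pvDiffWitness_generate_negative_prompts.2.1) (pvDiffWitness_generate_negative_prompts.2.2) ∧ D_generate_negative_prompts (pvDiffWitness_generate_negative_prompts.1) (pvDiffWitness_generate_negative_prompts.2.1) (pvDiffWitness_generate_negative_prompts.2.2) ∧ generate_negative_prompts (pvDiffWitness_generate_negative_prompts.1) (pvDiffWitness_generate_negative_prompts.2.1) (pvDiffWitness_generate_negative_prompts.2.2) = pvDiffWitnessOut_generate_negative_prompts.1 ∧ generate_negative_prompts_alt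 (pvDiffWitness_generate_negative_prompts.1) (pvDiffWitness_generate_negative_prompts.2.1) (pvDiffWitness_generate_negative_prompts.2.2) = pvDiffWitnessOut_generate_negative_prompts.2 ∧ pvDiffWitnessOut_generate_negative_prompts.1 ≠ pvDiffWitnessOut_generate_negative_prompts.2
def Claim_exact_generate_negative_prompts : Prop := ∀ (scene_collision_info : List (List (String × String))) (current_obj_name : String) (num_neg_prompts : Int), Dom_generate_negative_prompts scene_collision_info current_obj_name num_neg_prompts → D_generate_negative_prompts scene_collision_info current_obj_name num_neg_prompts → generate_negative_prompts scene_collision_info current_obj_name num_neg_prompts ≠ generate_negative_prompts_alt scene_collision_info current_obj_name num_neg_prompts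

-- ===== LEMMAS AND PROOFS =====

-- order-preserving dedup of a string list, skipping an initial seen set
def pvDedupFrom (seen : PySem.Set String) : List String → List String
  | [] => []
  | a :: l => if PySem.Set.contains seen a then pvDedupFrom seen l else a :: pvDedupFrom (PySem.Set.add seen a) l

-- the per-entry contribution of A's filter loop
def pvNameOf (current_obj_name : String) (obj_info : List (String × String)) : List String :=
  match (PySem.Dict.mk obj_info).get? "object_name" with
  | none => []
  | some obj_name => if obj_name != "" && obj_name != current_obj_name then [obj_name] else []

-- A's dedup step
def pvDedupStep (st : List String × PySem.Set String) (name : String) : List String × PySem.Set String :=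
  if st.2.contains name then st else (st.1 ++ [name], st.2.add name)

lemma pv_flatMap_filtered (cur : String) (sci : List (List (String × String))) :
    sci.flatMap (pvNameOf cur) = pvFiltered cur sci := by
  induction sci with
  | nil => rfl
  | cons o rest ih =>
      simp only [List.flatMap_cons, pvFiltered, List.filterMap_cons] at *
      cases h : (PySem.Dict.mk o).get? "object_name" with
      | none => simpa [pvNameOf, h] using ih
      | some name =>
          by_cases h1 : name = "" <;> by_cases h2 : name = cur <;>
            simp [pvNameOf, h, h1, h2, ih]

lemma pv_dedup_foldl (names : List String) (l : List String) (s : PySem.Set String) :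
    (names.foldl pvDedupStep (l, s)).1 = l ++ pvDedupFrom s names := by
  induction names generalizing l s with
  | nil => simp [pvDedupFrom]
  | cons a names ih =>
      simp only [List.foldl_cons, pvDedupFrom, pvDedupStep]
      by_cases hm : a ∈ s <;> simp [hm, ih]

lemma pv_ofList_dedupFrom (l : List String) (s : PySem.Set String) :
    l.foldl PySem.Set.add s = s ++ pvDedupFrom s l := by
  induction l generalizing s with
  | nil => simp [pvDedupFrom]
  | cons a l ih =>
      simp only [List.foldl_cons, pvDedupFrom]
      by_cases hm : a ∈ s <;> simp [hm, PySem.Set.add, ih]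

lemma pv_dedup_eq (l : List String) : PySem.List.dedup l = pvDedupFrom PySem.Set.empty l := by
  have := pv_ofList_dedupFrom l PySem.Set.empty
  simpa [PySem.List.dedup_eq_ofList, PySem.Set.ofList_eq_foldl, PySem.Set.empty] using this

lemma pv_altGo_eq (cur : String) (items : List (List (String × String))) (k : Int)
    (prompts : List String) (seen : PySem.Set String) (last : String) :
    pvAltGo cur items k prompts seen last =
      prompts ++ ((pvDedupFrom seen (pvFiltered cur items)) ++
        List.replicate (k.toNat - (pvDedupFrom seen (pvFiltered cur items)).length)
          ((pvDedupFrom seen (pvFiltered cur items)).getLastD last)).take k.toNat := by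
  induction items generalizing k prompts seen last with
  | nil =>
      simp [pvAltGo, pvFiltered, pvDedupFrom, PySem.List.pyRepeat_singleton, List.take_replicate]
  | cons o rest ih =>
      by_cases hk : k ≤ 0
      · have hk0 : k.toNat = 0 := by omega
        simp [pvAltGo, hk, hk0]
      · have hk1 : k.toNat = (k - 1).toNat + 1 := by omega
        cases h : (PySem.Dict.mk o).get? "object_name" with
        | none =>
            simp only [pvAltGo, hk, if_neg, h, pvFiltered, List.filterMap_cons] at *
            exact ih k prompts seen last
        | some name =>
            by_cases h1 : name = ""
            · simp only [pvAltGo, hk, if_false, h, h1, pvFiltered, List.filterMap_cons] at *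
              simpa [h1] using ih k prompts seen last
            · by_cases h2 : name = cur
              · simp only [pvAltGo, hk, h, pvFiltered, List.filterMap_cons] at *
                simpa [h1, h2] using ih k prompts seen last
              · by_cases hm : name ∈ seen
                · simp only [pvAltGo, hk, h, pvFiltered, List.filterMap_cons] at *
                  simpa [h1, h2, hm, pvDedupFrom] using ih k prompts seen last
                · have lhs : pvAltGo cur (o :: rest) k prompts seen last =
                      pvAltGo cur rest (k - 1) (prompts ++ [name]) (PySem.Set.add seen name) name := by
                    simp [pvAltGo, hk, h, h1, h2, hm]
                  rw [lhs, ih]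
                  have hu : pvDedupFrom seen (pvFiltered cur (o :: rest)) =
                      name :: pvDedupFrom (PySem.Set.add seen name) (pvFiltered cur rest) := by
                    simp [pvFiltered, List.filterMap_cons, h, h1, h2, pvDedupFrom, hm]
                  rw [hu, List.getLastD_cons]
                  have hc : k.toNat - ((pvDedupFrom (PySem.Set.add seen name) (pvFiltered cur rest)).length + 1)
                      = (k - 1).toNat - (pvDedupFrom (PySem.Set.add seen name) (pvFiltered cur rest)).length := by
                    omega
                  simp only [hk1, List.length_cons, hc, List.cons_append, List.take_succ_cons,
                    List.append_assoc, List.singleton_append, List.nil_append,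
                    Nat.add_sub_add_right]

lemma pv_pad (u : List String) (n : Int) (h : 0 ≤ n ∨ (u.length : Int) + n ≤ 0) :
    (if u.length = 0 then PySem.List.pyRepeat [""] n
     else if (u.length : Int) < n then
       u ++ PySem.List.pyRepeat [PySem.List.pyGetD u (-1) ""] (n - u.length)
     else PySem.List.slice u none (some n))
    = (u ++ List.replicate (n.toNat - u.length) (u.getLastD "")).take n.toNat := by
  by_cases hn : n ≤ 0
  · have h0 : n.toNat = 0 := by omega
    rcases List.eq_nil_or_concat u with hu | ⟨ys, y, hy⟩
    · subst hu
      simp [PySem.List.pyRepeat_singleton, h0]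
    · have hne : u.length ≠ 0 := by simp [hy]
      have hlt : ¬ ((u.length : Int) < n) := by
        have : 1 ≤ u.length := by omega
        omega
      simp only [if_neg hne, if_neg hlt, h0, List.take_zero]
      by_cases hzero : n = 0
      · subst hzero
        rw [PySem.List.slice_to u (by omega)]
        simp
      · have hk : n = -(((-n).toNat : Nat) : Int) := by omega
        rw [hk, PySem.List.slice_to_neg_natCast u (-n).toNat (by omega)]
        have hle : (u.length : Int) + n ≤ 0 := by
          rcases h with h | h
          · omega
          · exact h
        have : u.length - (-n).toNat = 0 := by omega
        simp [this]
  · have hn0 : (0 : Int) ≤ n := by omega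
    by_cases hne : u.length = 0
    · have hu : u = [] := List.length_eq_zero_iff.mp hne
      subst hu
      simp [PySem.List.pyRepeat_singleton, List.take_replicate]
    · simp only [if_neg hne]
      by_cases hlt : (u.length : Int) < n
      · simp only [if_pos hlt]
        have hnn : u ≠ [] := by
          intro hc; subst hc; simp at hne
        rw [PySem.List.pyGetD_neg_one u "" hnn, PySem.List.pyRepeat_singleton]
        have hlast : u.getLast hnn = u.getLastD "" := by
          rw [List.getLastD_eq_getLast?, List.getLast?_eq_getLast hnn]
          rfl
        rw [hlast]
        have hcount : (n - (u.length : Int)).toNat = n.toNat - u.length := by omega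
        rw [hcount]
        rw [List.take_of_length_le (by simp [List.length_replicate]; omega)]
      · simp only [if_neg hlt]
        rw [PySem.List.slice_to u hn0]
        have : n.toNat - u.length = 0 := by omega
        rw [this]
        simp

-- A's value, rewritten through pvDedupFrom
lemma pv_A_eq (sci : List (List (String × String))) (cur : String) (n : Int) :
    generate_negative_prompts sci cur n =
      (let u := pvDedupFrom PySem.Set.empty (pvFiltered cur sci)
       if u.length = 0 then PySem.List.pyRepeat [""] n
       else if (u.length : Int) < n then
         u ++ PySem.List.pyRepeat [PySem.List.pyGetD u (-1) ""] (n - u.length)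
       else PySem.List.slice u none (some n)) := by
  unfold generate_negative_prompts
  have hstep : (fun (acc : List String) obj_info =>
      match (PySem.Dict.mk obj_info).get? "object_name" with
      | none => acc
      | some obj_name => if obj_name != "" && obj_name != cur then acc ++ [obj_name] else acc)
      = fun acc x => acc ++ pvNameOf cur x := by
    funext acc x
    unfold pvNameOf
    cases (PySem.Dict.mk x).get? "object_name" with
    | none => simp
    | some name => by_cases h : (name != "" && name != cur) = true <;> simp [h]
  have hd : (fun (st : List String × PySem.Set String) name =>
      if st.2.contains name then st else (st.1 ++ [name], st.2.add name)) = pvDedupStep := rfl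
  simp only [hstep, hd, PySem.List.foldl_append_eq_flatMap, List.nil_append,
    pv_flatMap_filtered, pv_dedup_foldl]

-- ===== VERDICT =====
theorem generate_negative_prompts_spec : Claim_unchanged_generate_negative_prompts := by
  intro sci cur n _ hD
  unfold generate_negative_prompts_alt
  have hu := pv_dedup_eq (pvFiltered cur sci)
  have h : 0 ≤ n ∨ ((pvDedupFrom PySem.Set.empty (pvFiltered cur sci)).length : Int) + n ≤ 0 := by
    by_contra hc
    push_neg at hc
    exact hD ⟨by omega, by rw [hu]; omega⟩
  rw [pv_A_eq, pv_altGo_eq]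
  simpa using pv_pad (pvDedupFrom PySem.Set.empty (pvFiltered cur sci)) n h

theorem generate_negative_prompts_changed : Claim_changed_generate_negative_prompts := by
  unfold Claim_changed_generate_negative_prompts; decide

theorem generate_negative_prompts_tight : Claim_exact_generate_negative_prompts := by
  intro sci cur n _ hD
  obtain ⟨hn, hlen⟩ := hD
  have hu := pv_dedup_eq (pvFiltered cur sci)
  rw [hu] at hlen
  rw [pv_A_eq]
  unfold generate_negative_prompts_alt
  rw [pv_altGo_eq]
  have hB : ([] : List String) ++ ((pvDedupFrom PySem.Set.empty (pvFiltered cur sci)) ++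
      List.replicate (n.toNat - (pvDedupFrom PySem.Set.empty (pvFiltered cur sci)).length)
        ((pvDedupFrom PySem.Set.empty (pvFiltered cur sci)).getLastD "")).take n.toNat = [] := by
    have : n.toNat = 0 := by omega
    simp [this]
  rw [hB]
  have hne : (pvDedupFrom PySem.Set.empty (pvFiltered cur sci)).length ≠ 0 := by omega
  have hlt : ¬ (((pvDedupFrom PySem.Set.empty (pvFiltered cur sci)).length : Int) < n) := by omega
  simp only [if_neg hne, if_neg hlt]
  have hk : n = -(((-n).toNat : Nat) : Int) := by omega
  rw [hk, PySem.List.slice_to_neg_natCast _ (-n).toNat (by omega)]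
  intro hc
  rw [List.take_eq_nil_iff] at hc
  rcases hc with hc | hc
  · omega
  · rw [hc] at hlen
    simp at hlen
    omega
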